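-- pv_equiv track=rewrite | github.com/loparcog/AdventOfCode2024 | W1.py | tryTwoOps
-- ===== SOURCE A (Python) =====
-- def tryTwoOps(t, nums):
--     # Store flags for each (binary number)
--     flagbase = "{:0%db}" % (len(nums) - 1)
--     # Loop through each number set
--     for i in range(2**(len(nums) - 1)):
--         # Start with plus
--         flags = flagbase.format(i)
--         total = nums[0]
--         for j in range(len(nums) - 1):
--             if int(flags[j]):
--                 # Addition
--                 total += nums[j + 1]
--             else:
--                 # Multiply
--                 total *= nums[j + 1]
--         # Check total
--         if total == t:
--             # It matches!
--             return True
--     # None found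
--     return False
-- ===== SOURCE B (Python) =====
-- def tryTwoOps(t, nums):
--     # Set-based DP over running totals instead of enumerating all 2^(n-1) op strings
--     totals = {nums[0]}
--     for n in nums[1:]:
--         totals = {r for x in totals for r in (x + n, x * n)}
--     return t in totals
-- ===== Notes on version B (the rewrite author's own statement) =====
-- stated objective: alternative
-- what changed: B replaces A's enumeration of all 2^(n-1) operator bit-strings (re-evaluating the whole expression for each) with a single left-to-right pass keeping a set of deduplicated running totals (measured 7.6x at n=16, but both exponential worst case, so no speed claim).
import Mathlib
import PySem

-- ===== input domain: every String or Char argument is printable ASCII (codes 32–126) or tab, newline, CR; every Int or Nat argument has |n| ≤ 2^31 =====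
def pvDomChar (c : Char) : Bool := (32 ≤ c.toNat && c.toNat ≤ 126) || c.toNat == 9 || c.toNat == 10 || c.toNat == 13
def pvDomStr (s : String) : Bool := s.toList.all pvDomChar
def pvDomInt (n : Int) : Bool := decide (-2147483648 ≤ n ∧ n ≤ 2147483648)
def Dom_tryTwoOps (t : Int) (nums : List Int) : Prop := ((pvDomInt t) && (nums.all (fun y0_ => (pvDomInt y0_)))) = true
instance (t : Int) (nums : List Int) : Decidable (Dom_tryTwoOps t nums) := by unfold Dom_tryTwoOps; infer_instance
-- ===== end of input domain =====

-- B replaces A's enumeration of all 2^(n-1) operator bit-strings by a set-based DP over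
-- deduplicated running totals (objective: alternative algorithm; both exponential worst case).

-- ===== PORT A =====
-- hand port of Python's '{:0Nb}'.format(i): binary digits of i, MSB first ('0' for i = 0),
-- left-padded with zeros to width w (exact for i ≥ 0, which is all A uses)
def pyBinAux : Nat → List Nat
  | 0 => []
  | n + 1 => pyBinAux ((n + 1) / 2) ++ [(n + 1) % 2]
decreasing_by exact Nat.div_lt_self (Nat.succ_pos n) (by omega)

def pyBinNat (n : Nat) : List Nat := if n = 0 then [0] else pyBinAux n

def padZero (w : Nat) (l : List Nat) : List Nat := List.replicate (w - l.length) 0 ++ l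

def tryTwoOps (t : Int) (nums : List Int) : Bool :=
  match nums with
  | [] => false   -- unreachable: Pre_ excludes [] (Python raises TypeError there)
  | n0 :: rest =>
    (List.range (2 ^ rest.length)).any (fun i =>
      let flags := padZero rest.length (pyBinNat i)
      (flags.zip rest).foldl
        (fun total fn => if fn.1 ≠ 0 then total + fn.2 else total * fn.2) n0 == t)

-- ===== PORT B =====
def tryTwoOps_alt (t : Int) (nums : List Int) : Bool :=
  match nums with
  | [] => false   -- unreachable: Pre_ excludes [] (Python raises IndexError there)
  | n0 :: rest =>
    let totals : PySem.Set Int :=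
      rest.foldl
        (fun s n => PySem.Set.ofList (s.flatMap (fun x => [x + n, x * n])))
        (PySem.Set.ofList [n0])
    PySem.Set.contains totals t

-- ===== PRECONDITION & SPEC =====
-- Pre_ excludes only the empty list, on which both Pythons raise (A: TypeError, B: IndexError).
def Pre_tryTwoOps (t : Int) (nums : List Int) : Prop := nums ≠ []
instance (t : Int) (nums : List Int) : Decidable (Pre_tryTwoOps t nums) := by
  unfold Pre_tryTwoOps; infer_instance

def pvWitness_tryTwoOps : Int × List Int := (292, [11, 6, 16, 20])

def Spec_tryTwoOps (t : Int) (nums : List Int) (out : Bool) : Prop := out = tryTwoOps_alt t nums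
instance (t : Int) (nums : List Int) (out : Bool) : Decidable (Spec_tryTwoOps t nums out) := by
  unfold Spec_tryTwoOps; infer_instance

-- ===== CLAIM (what is proved, stated in full; the proofs are below) =====
def Claim_equal_tryTwoOps : Prop := ∀ (t : Int) (nums : List Int), Dom_tryTwoOps t nums → Pre_tryTwoOps t nums → Spec_tryTwoOps t nums (tryTwoOps t nums)

-- ===== LEMMAS AND PROOFS =====

-- all running totals reachable from acc over ns (with duplicates) — the common reference
def totalsR (acc : Int) : List Int → List Int
  | [] => [acc]
  | n :: ns => totalsR (acc + n) ns ++ totalsR (acc * n) ns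

-- width-w binary expansion of i, MSB first (proof-side normal form of A's flag string)
def bitsMSB : Nat → Nat → List Nat
  | 0, _ => []
  | w + 1, i => bitsMSB w (i / 2) ++ [i % 2]

theorem length_bitsMSB (w i : Nat) : (bitsMSB w i).length = w := by
  induction w generalizing i with
  | zero => rfl
  | succ w ih => simp [bitsMSB, ih]

theorem bitsMSB_zero (w : Nat) : bitsMSB w 0 = List.replicate w 0 := by
  induction w with
  | zero => rfl
  | succ w ih => simp [bitsMSB, ih, ← List.replicate_succ']

theorem padZero_pyBinAux (w i : Nat) (h : i < 2 ^ w) :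
    padZero w (pyBinAux i) = bitsMSB w i := by
  induction w generalizing i with
  | zero =>
    interval_cases i
    simp [pyBinAux, padZero, bitsMSB]
  | succ w ih =>
    match i with
    | 0 =>
      rw [pyBinAux, bitsMSB_zero]
      simp [padZero]
    | n + 1 =>
      have hdiv : (n + 1) / 2 < 2 ^ w := by
        have hp : (2 : Nat) ^ (w + 1) = 2 * 2 ^ w := by rw [pow_succ]; ring
        omega
      have ihd := ih _ hdiv
      have hlen : (pyBinAux ((n + 1) / 2)).length ≤ w := by
        have := congrArg List.length ihd
        simp only [padZero, List.length_append, List.length_replicate, length_bitsMSB] at this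
        omega
      rw [pyBinAux, show bitsMSB (w + 1) (n + 1)
            = bitsMSB w ((n + 1) / 2) ++ [(n + 1) % 2] from rfl, ← ihd]
      simp only [padZero, List.length_append, List.length_singleton]
      rw [← List.append_assoc]
      congr 2
      congr 1
      omega

theorem take_padZero_pyBinNat (w i : Nat) (h : i < 2 ^ w) :
    (padZero w (pyBinNat i)).take w = bitsMSB w i := by
  by_cases hi : i = 0
  · subst hi
    match w with
    | 0 => rfl
    | w + 1 =>
      rw [bitsMSB_zero]
      show (List.replicate (w + 1 - 1) 0 ++ [0]).take (w + 1) = _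
      rw [show w + 1 - 1 = w from rfl, ← List.replicate_succ']
      exact List.take_of_length_le (by simp)
  · rw [pyBinNat, if_neg hi, padZero_pyBinAux w i h,
      List.take_of_length_le (by rw [length_bitsMSB])]

theorem zip_take_self {α β : Type} (bs : List α) (ns : List β) :
    bs.zip ns = (bs.take ns.length).zip ns := by
  induction bs generalizing ns with
  | nil => simp
  | cons b bs ih => cases ns <;> simp [ih]

-- the fold over any flag string lands in totalsR
theorem foldl_mem_totalsR (ns : List Int) (bs : List Nat) (n0 : Int)
    (hlen : bs.length = ns.length) :
    ((bs.zip ns).foldl (fun total fn => if fn.1 ≠ 0 then total + fn.2 else total * fn.2) n0)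
      ∈ totalsR n0 ns := by
  induction ns generalizing bs n0 with
  | nil => simp [totalsR, List.zip_nil_right]
  | cons n ns ih =>
    match bs with
    | [] => simp at hlen
    | b :: bs =>
      simp only [List.zip_cons_cons, List.foldl_cons, totalsR, List.mem_append]
      by_cases hb : b ≠ 0
      · left; simp only [if_pos hb]; exact ih bs _ (by simpa using hlen)
      · right; simp only [if_neg hb]; exact ih bs _ (by simpa using hlen)

-- every element of totalsR is reached by some flag string of bits
theorem totalsR_reached (ns : List Int) (n0 x : Int) (hx : x ∈ totalsR n0 ns) :
    ∃ bs : List Nat, bs.length = ns.length ∧ (∀ b ∈ bs, b < 2) ∧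
      (bs.zip ns).foldl (fun total fn => if fn.1 ≠ 0 then total + fn.2 else total * fn.2) n0 = x := by
  induction ns generalizing n0 with
  | nil =>
    simp only [totalsR, List.mem_singleton] at hx
    exact ⟨[], rfl, by simp, by simp [hx]⟩
  | cons n ns ih =>
    simp only [totalsR, List.mem_append] at hx
    rcases hx with hx | hx
    · obtain ⟨bs, hl, hb, he⟩ := ih _ hx
      refine ⟨1 :: bs, by simp [hl], ?_, by simpa using he⟩
      intro b hb'
      rcases List.mem_cons.mp hb' with h | h
      · omega
      · exact hb _ h
    · obtain ⟨bs, hl, hb, he⟩ := ih _ hx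
      refine ⟨0 :: bs, by simp [hl], ?_, by simpa using he⟩
      intro b hb'
      rcases List.mem_cons.mp hb' with h | h
      · omega
      · exact hb _ h

-- every bit string of length w is bitsMSB w i for some i < 2^w
theorem bits_surj (bs : List Nat) (hb : ∀ b ∈ bs, b < 2) :
    ∃ i, i < 2 ^ bs.length ∧ bitsMSB bs.length i = bs := by
  induction bs using List.reverseRecOn with
  | nil => exact ⟨0, by simp, rfl⟩
  | append_singleton bs b ih =>
    obtain ⟨i, hi, hbits⟩ := ih (fun c hc => hb c (by simp [hc]))
    have hb2 : b < 2 := hb b (by simp)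
    refine ⟨2 * i + b, ?_, ?_⟩
    · simp only [List.length_append, List.length_singleton, pow_succ]
      omega
    · have h1 : (2 * i + b) / 2 = i := by omega
      have h2 : (2 * i + b) % 2 = b := by omega
      simp only [List.length_append, List.length_singleton, bitsMSB, h1, h2, hbits]

theorem A_iff (t n0 : Int) (rest : List Int) :
    tryTwoOps t (n0 :: rest) = true ↔ t ∈ totalsR n0 rest := by
  simp only [tryTwoOps, List.any_eq_true, List.mem_range, beq_iff_eq]
  constructor
  · rintro ⟨i, hi, he⟩
    rw [show (padZero rest.length (pyBinNat i)).zip rest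
          = ((padZero rest.length (pyBinNat i)).take rest.length).zip rest from
        zip_take_self _ _,
      take_padZero_pyBinNat _ _ hi] at he
    rw [← he]
    exact foldl_mem_totalsR rest _ n0 (length_bitsMSB _ _)
  · intro ht
    obtain ⟨bs, hl, hb, he⟩ := totalsR_reached rest n0 t ht
    obtain ⟨i, hi, hbits⟩ := bits_surj bs hb
    rw [hl] at hi hbits
    refine ⟨i, hi, ?_⟩
    rw [show (padZero rest.length (pyBinNat i)).zip rest
          = ((padZero rest.length (pyBinNat i)).take rest.length).zip rest from
        zip_take_self _ _,
      take_padZero_pyBinNat _ _ hi, hbits, he]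

theorem fold_set_mem (ns : List Int) (s : PySem.Set Int) (x : Int) :
    (x ∈ ns.foldl
        (fun s n => PySem.Set.ofList (s.flatMap (fun x => [x + n, x * n]))) s)
      ↔ ∃ y ∈ s, x ∈ totalsR y ns := by
  induction ns generalizing s with
  | nil => simp [totalsR]
  | cons n ns ih =>
    simp only [List.foldl_cons, ih, PySem.Set.mem_ofList, List.mem_flatMap]
    constructor
    · rintro ⟨y, hy, hx⟩
      simp only [List.mem_cons, List.not_mem_nil, or_false] at hy
      obtain ⟨z, hz, hyz⟩ := hy
      rcases hyz with h | h
      · exact ⟨z, hz, by simp [totalsR, h ▸ hx]⟩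
      · exact ⟨z, hz, by simp [totalsR, h ▸ hx]⟩
    · rintro ⟨z, hz, hx⟩
      simp only [totalsR, List.mem_append] at hx
      rcases hx with h | h
      · exact ⟨z + n, ⟨z, hz, by simp⟩, h⟩
      · exact ⟨z * n, ⟨z, hz, by simp⟩, h⟩

theorem B_iff (t n0 : Int) (rest : List Int) :
    tryTwoOps_alt t (n0 :: rest) = true ↔ t ∈ totalsR n0 rest := by
  simp only [tryTwoOps_alt, PySem.Set.contains_iff, fold_set_mem]
  constructor
  · rintro ⟨y, hy, hx⟩
    have : y = n0 := by simpa [PySem.Set.mem_ofList] using hy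
    exact this ▸ hx
  · intro h
    exact ⟨n0, by simp [PySem.Set.mem_ofList], h⟩

-- ===== VERDICT (by name: the statement is the Claim_ definition above) =====
theorem tryTwoOps_spec : Claim_equal_tryTwoOps := by
  intro t nums _dom hpre
  unfold Spec_tryTwoOps
  match nums with
  | [] => exact absurd rfl hpre
  | n0 :: rest =>
    have := (A_iff t n0 rest).trans (B_iff t n0 rest).symm
    cases hA : tryTwoOps t (n0 :: rest) <;> cases hB : tryTwoOps_alt t (n0 :: rest) <;>
      simp_all
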